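-- pv_equiv track=rewrite | github.com/Elleida/arasaac | conjugarfrasev6.py | corregirverbocomer
-- ===== SOURCE A (Python) =====
-- def corregirverbocomer(texto,data):
--     pos=-1
--     if 'como' in texto:
--         for p in range(len(data)):
--             if data[p][0]=='como':
--                 pos=p
--             if data[p][2][0]=='V':
--                 return data
--         if pos>=0:
--             data[pos][2]='VMN0000'
--             data[pos][1]='comer'
--     return data
-- ===== SOURCE B (Python) =====
-- def corregirverbocomer(texto, data):
--     if 'como' in texto:
--         if not any(row[2][0] == 'V' for row in data):
--             for i in range(len(data) - 1, -1, -1):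
--                 if data[i][0] == 'como':
--                     data[i][2] = 'VMN0000'
--                     data[i][1] = 'comer'
--                     break
--     return data
-- ===== Notes on version B (the rewrite author's own statement) =====
-- stated objective: simpler
-- what changed: Replaces A's single forward loop that interleaves last-'como' tracking with the verb early-return by two separate short passes: a short-circuiting any() verb check, and only if no verb exists a backward scan that stops at the last 'como' and fixes it in place.
import Mathlib
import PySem

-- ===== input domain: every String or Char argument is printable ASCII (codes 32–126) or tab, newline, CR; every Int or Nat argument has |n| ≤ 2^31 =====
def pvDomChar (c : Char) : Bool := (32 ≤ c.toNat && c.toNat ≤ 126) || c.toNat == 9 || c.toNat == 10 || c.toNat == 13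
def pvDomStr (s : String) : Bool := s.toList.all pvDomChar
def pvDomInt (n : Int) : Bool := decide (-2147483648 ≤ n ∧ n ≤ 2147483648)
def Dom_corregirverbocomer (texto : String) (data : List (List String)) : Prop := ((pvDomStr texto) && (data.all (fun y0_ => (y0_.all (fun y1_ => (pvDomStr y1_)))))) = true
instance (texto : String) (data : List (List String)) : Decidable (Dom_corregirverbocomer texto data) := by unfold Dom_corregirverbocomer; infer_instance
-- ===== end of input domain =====

-- B replaces A's single forward loop (last-'como' tracking interleaved with a verb early-return)
-- by a short-circuiting any() verb check followed, only when no verb exists, by a backward scan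
-- stopping at the last 'como'; objective: simpler.  Both A and B mutate `data` in place identically
-- (the fixed row); the ports and proof are about the returned list.

-- ===== PORT A =====
-- forward loop of A: option pos result; `none` means the early `return data` at a verb row
def pvAGo : List (List String) → Nat → Int → Option Int
  | [], _, pos => some pos
  | r :: rs, p, pos =>
      let pos' : Int := if (PySem.List.pyGet? r 0).getD "" == "como" then (p : Int) else pos
      if PySem.Str.pyGet? ((PySem.List.pyGet? r 2).getD "") 0 == some 'V' then none
      else pvAGo rs (p + 1) pos'

def corregirverbocomer (texto : String) (data : List (List String)) : List (List String) :=
  if PySem.Str.isIn "como" texto then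
    match pvAGo data 0 (-1) with
    | none => data
    | some pos =>
        if pos ≥ 0 then
          data.set pos.toNat
            ((((PySem.List.pyGet? data pos).getD []).set 2 "VMN0000").set 1 "comer")
        else data
  else data

-- ===== PORT B =====
-- `any(row[2][0] == 'V' for row in data)`
def pvBVerb (r : List String) : Bool :=
  PySem.Str.pyGet? ((PySem.List.pyGet? r 2).getD "") 0 == some 'V'

-- backward scan `for i in range(len(data)-1, -1, -1): if data[i][0] == 'como': … break`
def pvBFindDown (data : List (List String)) : Nat → Option Nat
  | 0 => none
  | n + 1 =>
      if (PySem.List.pyGet? ((PySem.List.pyGet? data (n : Int)).getD []) 0).getD "" == "como"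
      then some n else pvBFindDown data n

def corregirverbocomer_alt (texto : String) (data : List (List String)) : List (List String) :=
  if PySem.Str.isIn "como" texto then
    if data.any pvBVerb then data
    else
      match pvBFindDown data data.length with
      | some i =>
          data.set i
            ((((PySem.List.pyGet? data (i : Int)).getD []).set 2 "VMN0000").set 1 "comer")
      | none => data
  else data

-- ===== PRECONDITION & SPEC =====
-- Pre_ excludes exactly the inputs on which Python A raises IndexError: 'como' occurs in texto and
-- the forward scan reaches a malformed row (fewer than 3 fields, or an empty third field) before
-- any verb row.
def pvPreBad (r : List String) : Bool := r.length < 3 || (r.getD 2 "" == "")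
def pvPreVerb (r : List String) : Bool := PySem.Str.pyGet? (r.getD 2 "") 0 == some 'V'
def Pre_corregirverbocomer (texto : String) (data : List (List String)) : Prop :=
  PySem.Str.isIn "como" texto = true →
    ∀ i < data.length, pvPreBad (data.getD i []) = true →
      ∃ j < i, pvPreVerb (data.getD j []) = true
instance (texto : String) (data : List (List String)) : Decidable (Pre_corregirverbocomer texto data) := by unfold Pre_corregirverbocomer; infer_instance

def pvWitness_corregirverbocomer : String × List (List String) :=
  ("yo como pan", [["yo", "yo", "PP1"], ["como", "como", "CS0"], ["pan", "pan", "NC0"]])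

def Spec_corregirverbocomer (texto : String) (data : List (List String)) (out : List (List String)) : Prop := out = corregirverbocomer_alt texto data
instance (texto : String) (data : List (List String)) (out : List (List String)) : Decidable (Spec_corregirverbocomer texto data out) := by unfold Spec_corregirverbocomer; infer_instance

-- ===== CLAIM (what is proved, stated in full; the proofs are below) =====
def Claim_equal_corregirverbocomer : Prop := ∀ (texto : String) (data : List (List String)), Dom_corregirverbocomer texto data → Pre_corregirverbocomer texto data → Spec_corregirverbocomer texto data (corregirverbocomer texto data)

-- ===== LEMMAS AND PROOFS =====

-- proof-side characterisation: last index whose first field is "como"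
def pvLastComo : List (List String) → Option Nat
  | [] => none
  | r :: rs =>
      match pvLastComo rs with
      | some j => some (j + 1)
      | none => if (PySem.List.pyGet? r 0).getD "" == "como" then some 0 else none

theorem pvAGo_cons (r : List String) (rs : List (List String)) (p : Nat) (pos : Int) :
    pvAGo (r :: rs) p pos =
      if pvBVerb r then none
      else pvAGo rs (p + 1) (if (PySem.List.pyGet? r 0).getD "" == "como" then (p : Int) else pos) := rfl

theorem pvAGo_eq_none_iff (l : List (List String)) (p : Nat) (pos : Int) :
    pvAGo l p pos = none ↔ l.any pvBVerb = true := by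
  induction l generalizing p pos with
  | nil => simp [pvAGo]
  | cons r rs ih =>
      rw [pvAGo_cons]
      cases hb : pvBVerb r
      · simp only [Bool.false_eq_true, if_false, List.any_cons, hb, Bool.false_or]
        exact ih _ _
      · simp [hb]

theorem pvAGo_eq_some (l : List (List String)) (p : Nat) (pos : Int)
    (h : l.any pvBVerb = false) :
    pvAGo l p pos = some
      (match pvLastComo l with
       | some j => ((p + j : Nat) : Int)
       | none => pos) := by
  induction l generalizing p pos with
  | nil => simp [pvAGo, pvLastComo]
  | cons r rs ih =>
      simp only [List.any_cons, Bool.or_eq_false_iff] at h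
      rw [pvAGo_cons, h.1]
      simp only [Bool.false_eq_true, if_false]
      rw [ih _ _ h.2]
      cases hlc : pvLastComo rs with
      | some j =>
          simp only [pvLastComo, hlc]
          congr 1
          push_cast
          ring
      | none =>
          simp only [pvLastComo, hlc]
          cases hc : ((PySem.List.pyGet? r 0).getD "" == "como") <;> simp [hc]

theorem pvBFindDown_append (l : List (List String)) (r : List String) (n : Nat)
    (hn : n ≤ l.length) : pvBFindDown (l ++ [r]) n = pvBFindDown l n := by
  induction n with
  | zero => simp [pvBFindDown]
  | succ m ih =>
      have hm : m < l.length := by omega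
      have hget : PySem.List.pyGet? (l ++ [r]) (m : Int) = PySem.List.pyGet? l (m : Int) := by
        simp [PySem.List.pyGet?_natCast, List.getElem?_append_left hm]
      rw [pvBFindDown, pvBFindDown, hget, ih (by omega)]

theorem pvLastComo_append (l : List (List String)) (r : List String) :
    pvLastComo (l ++ [r]) =
      if (PySem.List.pyGet? r 0).getD "" == "como" then some l.length
      else pvLastComo l := by
  induction l with
  | nil =>
      cases hc : ((PySem.List.pyGet? r 0).getD "" == "como") <;> simp [pvLastComo, hc]
  | cons x xs ih =>
      simp only [List.cons_append, pvLastComo, ih]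
      cases hc : ((PySem.List.pyGet? r 0).getD "" == "como")
      · simp only [Bool.false_eq_true, if_false]
      · simp only [if_true, List.length_cons]

theorem pvBFindDown_eq_lastComo (l : List (List String)) :
    pvBFindDown l l.length = pvLastComo l := by
  induction l using List.reverseRecOn with
  | nil => simp [pvBFindDown, pvLastComo]
  | append_singleton xs r ih =>
      have hlen : (xs ++ [r]).length = xs.length + 1 := by simp
      rw [hlen, pvBFindDown]
      have hget : PySem.List.pyGet? (xs ++ [r]) ((xs.length : Nat) : Int) = some r := by
        simp
      rw [hget, pvLastComo_append]
      simp only [Option.getD_some]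
      rw [(pvBFindDown_append xs r xs.length le_rfl).trans ih]
      rfl

theorem corregir_eq (texto : String) (data : List (List String)) :
    corregirverbocomer texto data = corregirverbocomer_alt texto data := by
  unfold corregirverbocomer corregirverbocomer_alt
  cases ht : PySem.Str.isIn "como" texto
  · simp only [Bool.false_eq_true, if_false]
  · simp only [if_true]
    cases hv : data.any pvBVerb
    · rw [pvAGo_eq_some data 0 (-1) hv, pvBFindDown_eq_lastComo]
      simp only [Bool.false_eq_true, if_false]
      cases hlc : pvLastComo data with
      | none => simp
      | some j =>
          simp only [Nat.zero_add]
          have hge : (0 : Int) ≤ (j : Int) := Int.natCast_nonneg j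
          simp [hge, Int.toNat_natCast]
    · have hnone : pvAGo data 0 (-1) = none := (pvAGo_eq_none_iff data 0 (-1)).mpr hv
      simp [hnone]

-- ===== VERDICT (by name: the statement is the Claim_ definition above) =====
theorem corregirverbocomer_spec : Claim_equal_corregirverbocomer := by
  intro texto data _ _
  unfold Spec_corregirverbocomer
  exact corregir_eq texto data
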